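-- pv_equiv track=rewrite | github.com/YankaiJia/bruce-lee-nmr-station | data-treatment/yield_from_nmr_spectrum/Integrator_v3_baseline.py | insert_every
-- ===== SOURCE A (Python) =====
-- def insert_every(lst, interval, value):
--
--     """
--     Inserts `value` into `lst` every `interval` elements.
--
--     Parameters:
--         lst      : List of elements (unchanged, original list).
--         interval : Insert `value` after every `interval` items.
--         value    : The value to insert.
--
--     Returns:
--         A new list with the value inserted at every `interval` position.
--     """
--
--     if interval <= 0:
--         raise ValueError("Interval must be a positive integer.")
--
--     result = []
--     for i in range(0, len(lst), interval):
--         result.extend(lst[i:i + interval])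
--         result.append(value)
--     return result
-- ===== SOURCE B (Python) =====
-- def insert_every(lst, interval, value):
--     if interval <= 0:
--         raise ValueError("Interval must be a positive integer.")
--     result = []
--     count = 0
--     for x in lst:
--         result.append(x)
--         count += 1
--         if count == interval:
--             result.append(value)
--             count = 0
--     if count > 0:
--         result.append(value)
--     return result
-- ===== Notes on version B (the rewrite author's own statement) =====
-- stated objective: alternative
-- what changed: Single pass over the elements with a counter that triggers the insertion, instead of a range/slice loop that copies chunks; the trailing value after a partial final chunk falls out of the count>0 check.
import Mathlib
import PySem

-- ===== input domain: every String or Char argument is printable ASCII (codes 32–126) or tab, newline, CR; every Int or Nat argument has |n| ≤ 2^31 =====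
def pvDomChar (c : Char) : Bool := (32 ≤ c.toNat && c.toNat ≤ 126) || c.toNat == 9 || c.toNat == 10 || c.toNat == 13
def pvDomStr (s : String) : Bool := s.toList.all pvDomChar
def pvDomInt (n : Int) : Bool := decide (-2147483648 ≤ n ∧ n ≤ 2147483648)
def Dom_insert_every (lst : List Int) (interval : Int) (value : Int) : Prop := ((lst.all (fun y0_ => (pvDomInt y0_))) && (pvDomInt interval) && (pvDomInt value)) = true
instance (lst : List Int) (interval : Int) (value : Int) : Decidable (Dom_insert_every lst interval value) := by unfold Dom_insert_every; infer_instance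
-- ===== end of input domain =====

-- B replaces A's range/slice chunk loop by a single per-element pass with a counter (alternative decomposition, same cost).
-- Pre_ excludes interval ≤ 0, where the Python A raises ValueError.

-- ===== PORT A =====
-- the 'for i in range(0, len(lst), interval)' loop as recursion on i (step = interval.toNat ≥ 1 inside Pre_)
def insertEveryLoopA (lst : List Int) (k : Nat) (value : Int) (i : Nat) (res : List Int) : List Int :=
  if _h : i < lst.length ∧ 1 ≤ k then
    insertEveryLoopA lst k value (i + k)
      (res ++ PySem.List.slice lst (some (i : Int)) (some ((i : Int) + (k : Int))) ++ [value])
  else res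
termination_by lst.length - i
decreasing_by omega

def insert_every (lst : List Int) (interval : Int) (value : Int) : List Int :=
  if interval ≤ 0 then []  -- Python raises ValueError here; excluded by Pre_
  else insertEveryLoopA lst interval.toNat value 0 []

-- ===== PORT B =====
def insert_every_alt (lst : List Int) (interval : Int) (value : Int) : List Int :=
  if interval ≤ 0 then []  -- Python raises ValueError here; excluded by Pre_
  else
    let st := lst.foldl (fun (p : List Int × Int) x =>
      let res := p.1 ++ [x]
      let c := p.2 + 1
      if c == interval then (res ++ [value], 0) else (res, c)) ([], 0)
    if st.2 > 0 then st.1 ++ [value] else st.1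

-- ===== PRECONDITION & SPEC =====
-- Pre_ excludes exactly interval ≤ 0, on which Python A raises ValueError.
def Pre_insert_every (lst : List Int) (interval : Int) (value : Int) : Prop := 1 ≤ interval
instance (lst : List Int) (interval : Int) (value : Int) : Decidable (Pre_insert_every lst interval value) := by unfold Pre_insert_every; infer_instance
def pvWitness_insert_every : List Int × Int × Int := ([1, 2, 3, 4, 5], 2, 9)

def Spec_insert_every (lst : List Int) (interval : Int) (value : Int) (out : List Int) : Prop := out = insert_every_alt lst interval value
instance (lst : List Int) (interval : Int) (value : Int) (out : List Int) : Decidable (Spec_insert_every lst interval value out) := by unfold Spec_insert_every; infer_instance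

-- ===== CLAIM (what is proved, stated in full; the proofs are below) =====
def Claim_equal_insert_every : Prop := ∀ (lst : List Int) (interval : Int) (value : Int), Dom_insert_every lst interval value → Pre_insert_every lst interval value → Spec_insert_every lst interval value (insert_every lst interval value)

-- ===== LEMMAS AND PROOFS =====

-- reference: elements chunked with r slots left in the current chunk (r = k at a chunk boundary)
def chunkRef (lst : List Int) (r k : Nat) (v : Int) : List Int :=
  match lst with
  | [] => if r == k then [] else [v]
  | x :: xs => if r == 1 then x :: v :: chunkRef xs k k v else x :: chunkRef xs (r - 1) k v

lemma chunkRef_chunk (lst : List Int) (r k : Nat) (v : Int)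
    (h1 : 1 ≤ r) (hk : r ≤ k) (hne : lst ≠ []) :
    chunkRef lst r k v = lst.take r ++ v :: chunkRef (lst.drop r) k k v := by
  induction lst generalizing r with
  | nil => exact absurd rfl hne
  | cons x xs ih =>
    by_cases hr : r = 1
    · subst hr
      simp [chunkRef]
    · obtain ⟨m, rfl⟩ : ∃ m, r = m + 1 := ⟨r - 1, by omega⟩
      have hm : 1 ≤ m := by omega
      by_cases hxs : xs = []
      · subst hxs
        rw [List.take_of_length_le (by simp only [List.length_cons, List.length_nil]; omega),
            List.drop_eq_nil_of_le (by simp only [List.length_cons, List.length_nil]; omega)]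
        show chunkRef [x] (m + 1) k v = [x] ++ v :: chunkRef [] k k v
        simp only [chunkRef]
        rw [if_neg (by simp only [beq_iff_eq]; omega),
            if_neg (by simp only [beq_iff_eq]; omega),
            if_pos (beq_self_eq_true k)]
        simp
      · simp only [chunkRef, List.take_succ_cons, List.drop_succ_cons]
        rw [if_neg (by simp only [beq_iff_eq]; omega)]
        simp only [Nat.add_sub_cancel]
        rw [ih m hm (by omega) hxs]
        simp

lemma loopA_eq_chunkRef (lst : List Int) (k : Nat) (v : Int) (hk : 1 ≤ k) :
    ∀ n i res, lst.length - i ≤ n →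
      insertEveryLoopA lst k v i res = res ++ chunkRef (lst.drop i) k k v := by
  intro n
  induction n with
  | zero =>
    intro i res h
    rw [insertEveryLoopA, dif_neg (by omega)]
    rw [List.drop_eq_nil_of_le (by omega)]
    simp [chunkRef]
  | succ n ih =>
    intro i res h
    by_cases hi : i < lst.length
    · rw [insertEveryLoopA, dif_pos ⟨hi, hk⟩]
      rw [ih (i + k) _ (by omega)]
      rw [PySem.List.slice_natCast_add]
      rw [chunkRef_chunk (lst.drop i) k k v hk le_rfl
            (by apply List.ne_nil_of_length_pos; rw [List.length_drop]; omega)]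
      rw [show lst.drop (i + k) = (lst.drop i).drop k by
            rw [List.drop_drop]]
      simp
    · rw [insertEveryLoopA, dif_neg (by omega)]
      rw [List.drop_eq_nil_of_le (by omega)]
      simp [chunkRef]

lemma foldB_eq_chunkRef (k : Nat) (v : Int) (lst : List Int) :
    ∀ (r : Nat), 1 ≤ r → r ≤ k → ∀ res : List Int,
      (if (List.foldl (fun (p : List Int × Int) x =>
            if p.2 + 1 == (k : Int) then (p.1 ++ [x] ++ [v], 0) else (p.1 ++ [x], p.2 + 1))
            (res, (k : Int) - (r : Int)) lst).2 > 0
       then (List.foldl (fun (p : List Int × Int) x =>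
            if p.2 + 1 == (k : Int) then (p.1 ++ [x] ++ [v], 0) else (p.1 ++ [x], p.2 + 1))
            (res, (k : Int) - (r : Int)) lst).1 ++ [v]
       else (List.foldl (fun (p : List Int × Int) x =>
            if p.2 + 1 == (k : Int) then (p.1 ++ [x] ++ [v], 0) else (p.1 ++ [x], p.2 + 1))
            (res, (k : Int) - (r : Int)) lst).1) = res ++ chunkRef lst r k v := by
  induction lst with
  | nil =>
    intro r h1 h2 res
    rw [List.foldl_nil]
    by_cases h : r = k
    · subst h
      have hle : ¬((r : Int) - (r : Int) > 0) := by omega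
      rw [if_neg hle]
      simp only [chunkRef]
      rw [if_pos (beq_self_eq_true r)]
      simp
    · have hgt : ((k : Int) - (r : Int) > 0) := by omega
      rw [if_pos hgt]
      simp only [chunkRef]
      rw [if_neg (by simp only [beq_iff_eq]; omega)]
  | cons x xs ih =>
    intro r h1 h2 res
    rw [List.foldl_cons]
    by_cases hr : r = 1
    · subst hr
      have hstep : (((k : Int) - ((1 : Nat) : Int) + 1 == (k : Int)) = true) := by
        simp only [beq_iff_eq]; push_cast; ring
      rw [if_pos hstep]
      have := ih k (by omega) le_rfl (res ++ [x] ++ [v])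
      simp only [sub_self] at this
      rw [this]
      simp only [chunkRef]
      rw [if_pos (beq_self_eq_true 1)]
      simp
    · have hstep : (((k : Int) - (r : Int) + 1 == (k : Int)) = false) := by
        simp only [beq_eq_false_iff_ne, ne_eq]; omega
      have hcond : ¬(((k : Int) - (r : Int) + 1 == (k : Int)) = true) := by
        simp [hstep]
      rw [if_neg hcond]
      have := ih (r - 1) (by omega) (by omega) (res ++ [x])
      rw [show (k : Int) - (r : Int) + 1 = (k : Int) - ((r - 1 : Nat) : Int) by
            push_cast [Nat.cast_sub (by omega : 1 ≤ r)]; ring]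
      rw [this]
      simp only [chunkRef]
      rw [if_neg (by simp only [beq_iff_eq]; omega)]
      simp

-- ===== VERDICT (by name: the statement is the Claim_ definition above) =====
theorem insert_every_spec : Claim_equal_insert_every := by
  intro lst interval value _ hpre
  unfold Pre_insert_every at hpre
  unfold Spec_insert_every insert_every insert_every_alt
  rw [if_neg (by omega), if_neg (by omega)]
  have hk : 1 ≤ interval.toNat := by omega
  have hcast : ((interval.toNat : Int)) = interval := by omega
  rw [loopA_eq_chunkRef lst interval.toNat value hk lst.length 0 [] (by omega)]
  have := foldB_eq_chunkRef interval.toNat value lst interval.toNat hk le_rfl []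
  simp only [hcast, sub_self, List.drop_zero] at this ⊢
  exact this.symm
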